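-- pv_equiv track=rewrite | github.com/t3hw00t/ARW | scripts/ensure_openapi_descriptions.py | ensure_operation_tags
-- ===== SOURCE A (Python) =====
-- def ensure_operation_tags(op, path):
--     if op.get('tags'):
--         return None
--     # Heuristic mapping
--     m = [
--         ('/admin/models', 'Admin/Models'),
--         ('/admin/memory/quarantine', 'Admin/Review'),
--         ('/admin/memory', 'Admin/Memory'),
--         ('/admin/introspect', 'Admin/Introspect'),
--         ('/admin/tools', 'Admin/Tools'),
--         ('/admin/governor', 'Admin/Governor'),
--         ('/admin/hierarchy', 'Admin/Hierarchy'),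
--         ('/admin/experiments', 'Admin/Experiments'),
--         ('/admin/goldens', 'Admin/Goldens'),
--         ('/admin/distill', 'Admin/Distill'),
--         ('/admin/safety', 'Admin/Safety'),
--         ('/admin/self_model', 'Admin/SelfModel'),
--         ('/admin/world_diffs', 'Admin/Review'),
--         ('/admin/tasks', 'Admin/Tasks'),
--         ('/admin/probe', 'Admin/Introspect'),
--         ('/admin', 'Admin/Core'),
--         ('/state/projects', 'State/Projects'),
--         ('/state', 'State/Core'),
--         ('/projects', 'Projects'),
--         ('/spec', 'Public/Specs'),
--         ('/catalog', 'Public/Specs'),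
--     ]
--     tag = 'Public'
--     for pfx, t in m:
--         if path.startswith(pfx):
--             tag = t
--             break
--     op['tags'] = [tag]
--     return tag
-- ===== SOURCE B (Python) =====
-- def ensure_operation_tags(op, path):
--     if op.get('tags'):
--         return None
--     # Decision tree: branch on the top-level segment group, then dispatch on the
--     # remainder of the path.  Equivalent to the original ordered prefix table
--     # because every specific prefix there extends its group's common prefix.
--     if path.startswith('/admin'):
--         rest = path[6:]
--         if rest.startswith('/models'):
--             tag = 'Admin/Models'
--         elif rest.startswith('/memory'):
--             tag = 'Admin/Review' if rest.startswith('/memory/quarantine') else 'Admin/Memory'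
--         elif rest.startswith('/introspect') or rest.startswith('/probe'):
--             tag = 'Admin/Introspect'
--         elif rest.startswith('/tools'):
--             tag = 'Admin/Tools'
--         elif rest.startswith('/governor'):
--             tag = 'Admin/Governor'
--         elif rest.startswith('/hierarchy'):
--             tag = 'Admin/Hierarchy'
--         elif rest.startswith('/experiments'):
--             tag = 'Admin/Experiments'
--         elif rest.startswith('/goldens'):
--             tag = 'Admin/Goldens'
--         elif rest.startswith('/distill'):
--             tag = 'Admin/Distill'
--         elif rest.startswith('/safety'):
--             tag = 'Admin/Safety'
--         elif rest.startswith('/self_model'):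
--             tag = 'Admin/SelfModel'
--         elif rest.startswith('/world_diffs'):
--             tag = 'Admin/Review'
--         elif rest.startswith('/tasks'):
--             tag = 'Admin/Tasks'
--         else:
--             tag = 'Admin/Core'
--     elif path.startswith('/state'):
--         tag = 'State/Projects' if path[6:].startswith('/projects') else 'State/Core'
--     elif path.startswith('/projects'):
--         tag = 'Projects'
--     elif path.startswith('/spec') or path.startswith('/catalog'):
--         tag = 'Public/Specs'
--     else:
--         tag = 'Public'
--     op['tags'] = [tag]
--     return tag
-- ===== Notes on version B (the rewrite author's own statement) =====
-- stated objective: alternative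
-- what changed: Replaces the ordered scan of a flat 21-entry prefix table with a two-level decision tree that first branches on the leading segment group (/admin, /state, /projects, /spec|/catalog) and then dispatches on the path remainder past that group prefix.
import Mathlib
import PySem

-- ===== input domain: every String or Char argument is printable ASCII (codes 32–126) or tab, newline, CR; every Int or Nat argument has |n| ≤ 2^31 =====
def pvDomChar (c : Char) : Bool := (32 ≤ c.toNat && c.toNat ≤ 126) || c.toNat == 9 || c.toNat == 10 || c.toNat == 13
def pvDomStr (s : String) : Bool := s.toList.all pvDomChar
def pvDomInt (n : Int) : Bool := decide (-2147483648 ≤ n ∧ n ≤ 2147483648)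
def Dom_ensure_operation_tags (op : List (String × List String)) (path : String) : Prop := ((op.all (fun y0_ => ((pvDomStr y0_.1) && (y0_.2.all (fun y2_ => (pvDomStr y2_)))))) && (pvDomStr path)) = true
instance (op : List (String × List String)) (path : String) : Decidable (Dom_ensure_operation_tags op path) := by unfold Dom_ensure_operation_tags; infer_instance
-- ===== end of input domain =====

-- ===== PORT A =====
-- B replaces A's ordered scan of a flat prefix table by a two-level decision tree
-- (branch on the leading segment group, then dispatch on the path remainder);
-- return value only: both Pythons also set op['tags'] in place.
def pvTable : List (String × String) := [
    ("/admin/models", "Admin/Models"),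
    ("/admin/memory/quarantine", "Admin/Review"),
    ("/admin/memory", "Admin/Memory"),
    ("/admin/introspect", "Admin/Introspect"),
    ("/admin/tools", "Admin/Tools"),
    ("/admin/governor", "Admin/Governor"),
    ("/admin/hierarchy", "Admin/Hierarchy"),
    ("/admin/experiments", "Admin/Experiments"),
    ("/admin/goldens", "Admin/Goldens"),
    ("/admin/distill", "Admin/Distill"),
    ("/admin/safety", "Admin/Safety"),
    ("/admin/self_model", "Admin/SelfModel"),
    ("/admin/world_diffs", "Admin/Review"),
    ("/admin/tasks", "Admin/Tasks"),
    ("/admin/probe", "Admin/Introspect"),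
    ("/admin", "Admin/Core"),
    ("/state/projects", "State/Projects"),
    ("/state", "State/Core"),
    ("/projects", "Projects"),
    ("/spec", "Public/Specs"),
    ("/catalog", "Public/Specs")]

-- A's for-loop with break: first entry whose prefix matches, else the initial 'Public'
def pvScanA (path : String) : List (String × String) → String
  | [] => "Public"
  | (pfx, t) :: rest => if PySem.Str.startswith path pfx then t else pvScanA path rest

def ensure_operation_tags (op : List (String × List String)) (path : String) : Option String :=
  match (PySem.Dict.mk op).get? "tags" with
  | some (_ :: _) => none          -- truthy op.get('tags'): return None
  | _ => some (pvScanA path pvTable)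

-- ===== PORT B =====
-- B's decision tree over the path: top-level segment group first, then the remainder.
def pvTreeB (path : String) : String :=
  if PySem.Str.startswith path "/admin" then
    let rest := PySem.Str.slice path (some 6) none
    if PySem.Str.startswith rest "/models" then "Admin/Models"
    else if PySem.Str.startswith rest "/memory" then
      if PySem.Str.startswith rest "/memory/quarantine" then "Admin/Review" else "Admin/Memory"
    else if PySem.Str.startswith rest "/introspect" || PySem.Str.startswith rest "/probe" then "Admin/Introspect"
    else if PySem.Str.startswith rest "/tools" then "Admin/Tools"
    else if PySem.Str.startswith rest "/governor" then "Admin/Governor"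
    else if PySem.Str.startswith rest "/hierarchy" then "Admin/Hierarchy"
    else if PySem.Str.startswith rest "/experiments" then "Admin/Experiments"
    else if PySem.Str.startswith rest "/goldens" then "Admin/Goldens"
    else if PySem.Str.startswith rest "/distill" then "Admin/Distill"
    else if PySem.Str.startswith rest "/safety" then "Admin/Safety"
    else if PySem.Str.startswith rest "/self_model" then "Admin/SelfModel"
    else if PySem.Str.startswith rest "/world_diffs" then "Admin/Review"
    else if PySem.Str.startswith rest "/tasks" then "Admin/Tasks"
    else "Admin/Core"
  else if PySem.Str.startswith path "/state" then
    if PySem.Str.startswith (PySem.Str.slice path (some 6) none) "/projects" then "State/Projects"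
    else "State/Core"
  else if PySem.Str.startswith path "/projects" then "Projects"
  else if PySem.Str.startswith path "/spec" || PySem.Str.startswith path "/catalog" then "Public/Specs"
  else "Public"

def ensure_operation_tags_alt (op : List (String × List String)) (path : String) : Option String :=
  if ((PySem.Dict.mk op).getD "tags" []) ≠ [] then none   -- truthy op.get('tags'): return None
  else some (pvTreeB path)

-- ===== PRECONDITION & SPEC =====
def Spec_ensure_operation_tags (op : List (String × List String)) (path : String) (out : Option String) : Prop := out = ensure_operation_tags_alt op path
instance (op : List (String × List String)) (path : String) (out : Option String) : Decidable (Spec_ensure_operation_tags op path out) := by unfold Spec_ensure_operation_tags; infer_instance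

-- ===== CLAIM (what is proved, stated in full; the proofs are below) =====
def Claim_equal_ensure_operation_tags : Prop := ∀ (op : List (String × List String)) (path : String), Dom_ensure_operation_tags op path → Spec_ensure_operation_tags op path (ensure_operation_tags op path)

-- ===== LEMMAS AND PROOFS =====

theorem pv_append_prefix_iff (a b l : List Char) :
    a ++ b <+: l ↔ a <+: l ∧ b <+: l.drop a.length := by
  constructor
  · rintro ⟨t, rfl⟩
    refine ⟨⟨b ++ t, by simp⟩, ?_⟩
    rw [List.append_assoc, List.drop_left]
    exact ⟨t, rfl⟩
  · rintro ⟨⟨u, rfl⟩, hb⟩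
    rw [List.drop_left] at hb
    obtain ⟨v, rfl⟩ := hb
    exact ⟨v, by simp⟩

-- startswith against a concatenated prefix splits into two startswith tests
theorem pv_sw_append (l a b : List Char) :
    PySem.Chars.startswith l (a ++ b) =
      (PySem.Chars.startswith l a && PySem.Chars.startswith (l.drop a.length) b) := by
  rw [Bool.eq_iff_iff, Bool.and_eq_true, PySem.Chars.startswith_iff,
    PySem.Chars.startswith_iff, PySem.Chars.startswith_iff]
  exact pv_append_prefix_iff a b l

theorem pv_sw_mono (l a b : List Char) (hab : a <+: b)
    (h : PySem.Chars.startswith l b = true) : PySem.Chars.startswith l a = true :=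
  (PySem.Chars.startswith_iff l a).mpr (hab.trans ((PySem.Chars.startswith_iff l b).mp h))

-- two incomparable prefixes cannot both match
theorem pv_sw_excl (l a b : List Char) (hab : ¬ a <+: b) (hba : ¬ b <+: a)
    (h : PySem.Chars.startswith l a = true) : PySem.Chars.startswith l b = false := by
  by_contra hb
  have hb' : PySem.Chars.startswith l b = true := by
    cases hx : PySem.Chars.startswith l b with
    | true => rfl
    | false => exact absurd hx hb
  rcases List.prefix_or_prefix_of_prefix ((PySem.Chars.startswith_iff l a).mp h)
      ((PySem.Chars.startswith_iff l b).mp hb') with hc | hc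
  · exact hab hc
  · exact hba hc

-- A's first-match table scan computes B's decision tree on every path
theorem pv_tag_eq (path : String) : pvScanA path pvTable = pvTreeB path := by
  unfold pvTreeB
  simp only [pvTable, pvScanA, PySem.Str.startswith_eq, PySem.Str.toList_slice,
    PySem.Chars.slice_eq_listSlice]
  rw [PySem.List.slice_from path.toList (by norm_num : (0:Int) ≤ 6)]
  rw [show ("/admin/models".toList : List Char) = "/admin".toList ++ "/models".toList from rfl,
      show ("/admin/memory/quarantine".toList : List Char) = "/admin".toList ++ "/memory/quarantine".toList from rfl,
      show ("/admin/memory".toList : List Char) = "/admin".toList ++ "/memory".toList from rfl,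
      show ("/admin/introspect".toList : List Char) = "/admin".toList ++ "/introspect".toList from rfl,
      show ("/admin/tools".toList : List Char) = "/admin".toList ++ "/tools".toList from rfl,
      show ("/admin/governor".toList : List Char) = "/admin".toList ++ "/governor".toList from rfl,
      show ("/admin/hierarchy".toList : List Char) = "/admin".toList ++ "/hierarchy".toList from rfl,
      show ("/admin/experiments".toList : List Char) = "/admin".toList ++ "/experiments".toList from rfl,
      show ("/admin/goldens".toList : List Char) = "/admin".toList ++ "/goldens".toList from rfl,
      show ("/admin/distill".toList : List Char) = "/admin".toList ++ "/distill".toList from rfl,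
      show ("/admin/safety".toList : List Char) = "/admin".toList ++ "/safety".toList from rfl,
      show ("/admin/self_model".toList : List Char) = "/admin".toList ++ "/self_model".toList from rfl,
      show ("/admin/world_diffs".toList : List Char) = "/admin".toList ++ "/world_diffs".toList from rfl,
      show ("/admin/tasks".toList : List Char) = "/admin".toList ++ "/tasks".toList from rfl,
      show ("/admin/probe".toList : List Char) = "/admin".toList ++ "/probe".toList from rfl,
      show ("/state/projects".toList : List Char) = "/state".toList ++ "/projects".toList from rfl]
  simp only [pv_sw_append, show ("/admin".toList : List Char).length = 6 from rfl,
    show ("/state".toList : List Char).length = 6 from rfl,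
    show ((6:Int)).toNat = 6 from rfl]
  by_cases hA : PySem.Chars.startswith path.toList ['/', 'a', 'd', 'm', 'i', 'n'] = true
  · by_cases h1 : PySem.Chars.startswith (path.toList.drop 6) ['/', 'm', 'o', 'd', 'e', 'l', 's'] = true
    · simp [hA, h1]
    · by_cases hq : PySem.Chars.startswith (path.toList.drop 6) ['/', 'm', 'e', 'm', 'o', 'r', 'y', '/', 'q', 'u', 'a', 'r', 'a', 'n', 't', 'i', 'n', 'e'] = true
      · have hm : PySem.Chars.startswith (path.toList.drop 6) ['/', 'm', 'e', 'm', 'o', 'r', 'y'] = true :=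
          pv_sw_mono _ _ _ (by decide) hq
        simp [hA, h1, hq, hm]
      · by_cases hm : PySem.Chars.startswith (path.toList.drop 6) ['/', 'm', 'e', 'm', 'o', 'r', 'y'] = true
        · simp [hA, h1, hq, hm]
        · by_cases hi : PySem.Chars.startswith (path.toList.drop 6) ['/', 'i', 'n', 't', 'r', 'o', 's', 'p', 'e', 'c', 't'] = true
          · simp [hA, h1, hq, hm, hi]
          · by_cases hp : PySem.Chars.startswith (path.toList.drop 6) ['/', 'p', 'r', 'o', 'b', 'e'] = true
            · simp [hA, h1, hq, hm, hi, hp,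
                pv_sw_excl _ _ ['/', 't', 'o', 'o', 'l', 's'] (by decide) (by decide) hp,
                pv_sw_excl _ _ ['/', 'g', 'o', 'v', 'e', 'r', 'n', 'o', 'r'] (by decide) (by decide) hp,
                pv_sw_excl _ _ ['/', 'h', 'i', 'e', 'r', 'a', 'r', 'c', 'h', 'y'] (by decide) (by decide) hp,
                pv_sw_excl _ _ ['/', 'e', 'x', 'p', 'e', 'r', 'i', 'm', 'e', 'n', 't', 's'] (by decide) (by decide) hp,
                pv_sw_excl _ _ ['/', 'g', 'o', 'l', 'd', 'e', 'n', 's'] (by decide) (by decide) hp,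
                pv_sw_excl _ _ ['/', 'd', 'i', 's', 't', 'i', 'l', 'l'] (by decide) (by decide) hp,
                pv_sw_excl _ _ ['/', 's', 'a', 'f', 'e', 't', 'y'] (by decide) (by decide) hp,
                pv_sw_excl _ _ ['/', 's', 'e', 'l', 'f', '_', 'm', 'o', 'd', 'e', 'l'] (by decide) (by decide) hp,
                pv_sw_excl _ _ ['/', 'w', 'o', 'r', 'l', 'd', '_', 'd', 'i', 'f', 'f', 's'] (by decide) (by decide) hp,
                pv_sw_excl _ _ ['/', 't', 'a', 's', 'k', 's'] (by decide) (by decide) hp]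
            · simp [hA, h1, hq, hm, hi, hp]
              rfl
  · by_cases hst : PySem.Chars.startswith path.toList ['/', 's', 't', 'a', 't', 'e'] = true
    · simp [hA, hst]
    · by_cases hsp : PySem.Chars.startswith path.toList ['/', 's', 'p', 'e', 'c'] = true
      · simp [hA, hst, hsp]
      · simp [hA, hst, hsp]
        rfl

-- ===== VERDICT (by name: the statement is the Claim_ definition above) =====
theorem ensure_operation_tags_spec : Claim_equal_ensure_operation_tags := by
  intro op path _
  unfold Spec_ensure_operation_tags ensure_operation_tags ensure_operation_tags_alt
  rw [PySem.Dict.getD]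
  cases hget : (PySem.Dict.mk op).get? "tags" with
  | none => simpa using pv_tag_eq path
  | some l =>
    cases l with
    | nil => simpa using pv_tag_eq path
    | cons x xs => simp
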